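-- pv_equiv track=rewrite | github.com/MrBrantCode/unitest_baseline | mut_generate/mist_train_taco/taco_9144/solution.py | count_coin_combinations
-- ===== SOURCE A (Python) =====
-- from collections import defaultdict
--
-- def count_coin_combinations(N, V, a, b, c, d):
--     mp = defaultdict(int)
--
--     # Precompute the sums of coins from bags C and D
--     for val1 in c:
--         for val2 in d:
--             mp[val1 + val2] += 1
--
--     # Count the valid combinations from bags A and B
--     ans = 0
--     for val1 in a:
--         for val2 in b:
--             ans += mp[V - val1 - val2]
--
--     return ans
-- ===== SOURCE B (Python) =====
-- def count_coin_combinations(N, V, a, b, c, d):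
--     ab = sorted(x + y for x in a for y in b)
--     cd = sorted((x + y for x in c for y in d), reverse=True)
--     ans = 0
--     i, j = 0, 0
--     while i < len(ab) and j < len(cd):
--         s = ab[i] + cd[j]
--         if s < V:
--             i += 1
--         elif s > V:
--             j += 1
--         else:
--             run_a = i
--             while run_a < len(ab) and ab[run_a] == ab[i]:
--                 run_a += 1
--             run_c = j
--             while run_c < len(cd) and cd[run_c] == cd[j]:
--                 run_c += 1
--             ans += (run_a - i) * (run_c - j)
--             i = run_a
--             j = run_c
--     return ans
-- ===== Notes on version B (the rewrite author's own statement) =====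
-- stated objective: alternative
-- what changed: B sorts the a+b sums ascending and the c+d sums descending and counts matching pairs with a two-pointer merge over the two sorted arrays (counting equal runs), instead of A's hash map of c+d sums probed once per a,b pair.
import Mathlib
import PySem

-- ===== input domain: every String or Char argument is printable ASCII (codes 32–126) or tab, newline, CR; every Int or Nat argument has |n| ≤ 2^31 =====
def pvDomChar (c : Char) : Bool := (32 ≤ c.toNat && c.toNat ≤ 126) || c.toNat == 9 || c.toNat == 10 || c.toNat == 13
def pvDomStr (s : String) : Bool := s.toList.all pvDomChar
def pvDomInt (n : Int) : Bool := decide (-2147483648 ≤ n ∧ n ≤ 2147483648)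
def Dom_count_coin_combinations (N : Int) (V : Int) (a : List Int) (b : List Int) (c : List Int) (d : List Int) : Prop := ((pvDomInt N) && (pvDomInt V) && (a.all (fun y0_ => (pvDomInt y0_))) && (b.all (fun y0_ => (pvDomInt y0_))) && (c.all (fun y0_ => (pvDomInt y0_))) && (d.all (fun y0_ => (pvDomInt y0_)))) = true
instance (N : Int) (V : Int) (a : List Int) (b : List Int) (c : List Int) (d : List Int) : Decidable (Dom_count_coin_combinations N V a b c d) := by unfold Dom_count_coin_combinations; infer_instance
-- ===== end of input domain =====

-- B sorts the a+b sums ascending and the c+d sums descending and counts matching pairs with a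
-- two-pointer merge over the two sorted lists, instead of A's hash map probed per a,b pair
-- (objective: alternative).


-- ===== PORT A =====
-- mp is a defaultdict(int); reading mp[k] in the second loop returns 0 for a missing key
-- (the silent insertion of that 0 is unobservable, only values are read), so the read is getD _ 0.
def count_coin_combinations (N : Int) (V : Int) (a : List Int) (b : List Int) (c : List Int) (d : List Int) : Int :=
  let mp : PySem.Dict Int Int :=
    c.foldl (fun m val1 => d.foldl (fun m val2 => m.modify (val1 + val2) 0 (· + 1)) m) PySem.Dict.empty
  a.foldl (fun ans val1 =>
    b.foldl (fun ans val2 => ans + mp.getD (V - val1 - val2) 0) ans) 0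

-- ===== PORT B =====
-- The two index pointers i (into ab) and j (into cd) become the two list arguments of tpGo,
-- consumed at the head; the two inner run-counting loops are the takeWhiles, and advancing
-- i and j past their runs is the dropWhiles.
def tpGo (V : Int) : List Int → List Int → Int
  | [], _ => 0
  | _ :: _, [] => 0
  | x :: xs, y :: ys =>
    if x + y < V then tpGo V xs (y :: ys)
    else if x + y > V then tpGo V (x :: xs) ys
    else ((((x :: xs).takeWhile (fun z => z == x)).length : Int))
           * ((((y :: ys).takeWhile (fun z => z == y)).length : Int))
         + tpGo V ((x :: xs).dropWhile (fun z => z == x)) ((y :: ys).dropWhile (fun z => z == y))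
  termination_by xs ys => xs.length + ys.length
  decreasing_by
  all_goals simp
  all_goals try omega
  have h1 : (xs.dropWhile (fun z => z == x)).length ≤ xs.length := List.length_dropWhile_le ..
  have h2 : (ys.dropWhile (fun z => z == y)).length ≤ ys.length := List.length_dropWhile_le ..
  omega

def count_coin_combinations_alt (N : Int) (V : Int) (a : List Int) (b : List Int) (c : List Int) (d : List Int) : Int :=
  let ab := PySem.List.sorted (a.flatMap (fun x => b.map (fun y => x + y))) (fun s => s) false
  let cd := PySem.List.sorted (c.flatMap (fun x => d.map (fun y => x + y))) (fun s => s) true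
  tpGo V ab cd

-- ===== PRECONDITION & SPEC =====
def Spec_count_coin_combinations (N : Int) (V : Int) (a : List Int) (b : List Int) (c : List Int) (d : List Int) (out : Int) : Prop := out = count_coin_combinations_alt N V a b c d
instance (N : Int) (V : Int) (a : List Int) (b : List Int) (c : List Int) (d : List Int) (out : Int) : Decidable (Spec_count_coin_combinations N V a b c d out) := by unfold Spec_count_coin_combinations; infer_instance

-- ===== CLAIM (what is proved, stated in full; the proofs are below) =====
def Claim_equal_count_coin_combinations : Prop := ∀ (N : Int) (V : Int) (a : List Int) (b : List Int) (c : List Int) (d : List Int), Dom_count_coin_combinations N V a b c d → Spec_count_coin_combinations N V a b c d (count_coin_combinations N V a b c d)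

-- ===== LEMMAS AND PROOFS =====

-- A's nested building loops = counter of the flattened sum list.
theorem buildA_eq_counter (c d : List Int) :
    c.foldl (fun m val1 => d.foldl (fun m val2 => m.modify (val1 + val2) 0 (· + 1)) m)
      (PySem.Dict.empty : PySem.Dict Int Int)
    = PySem.Dict.counter (c.flatMap (fun x => d.map (fun y => x + y))) := by
  rw [PySem.Dict.counter_eq_foldl, List.foldl_flatMap]
  simp [List.foldl_map]

-- A's nested accumulation loops = sum of f over the flattened sum list.
theorem accA_eq_sum_init (a b : List Int) (f : Int → Int) (init : Int) :
    a.foldl (fun ans val1 => b.foldl (fun ans val2 => ans + f (val1 + val2)) ans) init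
    = init + ((a.flatMap (fun x => b.map (fun y => x + y))).map f).sum := by
  induction a generalizing init with
  | nil => simp
  | cons x a ih =>
    simp only [List.foldl_cons, List.flatMap_cons, List.map_append, List.sum_append]
    rw [ih, PySem.List.foldl_add, List.map_map]
    simp only [Function.comp_def]
    ring

-- In a weakly descending list whose elements are all ≤ y, the occurrences of y form the head run.
theorem count_eq_takeWhile_len (y : Int) (l : List Int)
    (hp : l.Pairwise (fun a b => b ≤ a)) (hub : ∀ z ∈ l, z ≤ y) :
    l.count y = (l.takeWhile (fun z => z == y)).length := by
  induction l with
  | nil => simp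
  | cons z l ih =>
    rcases List.pairwise_cons.mp hp with ⟨hz, hl⟩
    by_cases h : z = y
    · subst h
      simp [List.takeWhile_cons, ih hl hz]
    · have hzy : z < y := lt_of_le_of_ne (hub z (List.mem_cons_self ..)) h
      have h0 : l.count y = 0 := by
        apply List.count_eq_zero.mpr
        intro hy
        exact absurd (hz y hy) (not_le.mpr hzy)
      simp [h, List.takeWhile_cons, h0]

-- Sum of a constant over a list.
theorem sum_map_const_int {α : Type} (l : List α) (c : Int) :
    (l.map (fun _ => c)).sum = (l.length : Int) * c := by
  induction l with
  | nil => simp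
  | cons z l ih => simp [ih]; ring

-- In a weakly ascending list headed by x, everything past the head run of x is > x.
theorem lt_of_mem_dropWhile_head (x : Int) (l : List Int)
    (hp : (x :: l).Pairwise (· ≤ ·)) :
    ∀ z ∈ (x :: l).dropWhile (fun w => w == x), x < z := by
  have hx : ∀ w ∈ l, x ≤ w := (List.pairwise_cons.mp hp).1
  have hl : l.Pairwise (· ≤ ·) := (List.pairwise_cons.mp hp).2
  rw [List.dropWhile_cons_of_pos (by simp)]
  clear hp
  induction l with
  | nil => simp
  | cons y l ih =>
    by_cases h : y = x
    · subst h
      rw [List.dropWhile_cons_of_pos (by simp)]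
      exact ih (fun w hw => hx w (List.mem_cons_of_mem _ hw)) (List.pairwise_cons.mp hl).2
    · rw [List.dropWhile_cons_of_neg (by simp [h])]
      intro z hz
      have hxy : x < y := lt_of_le_of_ne (hx y (List.mem_cons_self ..)) (fun e => h e.symm)
      rcases List.mem_cons.mp hz with rfl | hzl
      · exact hxy
      · exact lt_of_lt_of_le hxy ((List.pairwise_cons.mp hl).1 z hzl)

-- Two-pointer merge with run skipping over sorted lists = sum over xs of the count of V - x in ys.
theorem tpGo_correct (V : Int) (xs ys : List Int)
    (hx : xs.Pairwise (· ≤ ·)) (hy : ys.Pairwise (fun a b => b ≤ a)) :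
    tpGo V xs ys = (xs.map (fun x => ((ys.count (V - x) : Nat) : Int))).sum := by
  fun_induction tpGo V xs ys with
  | case1 ys => simp
  | case2 x xs => simp
  | case3 x xs y ys hlt ih =>
    -- x + y < V: y is the maximum of y :: ys, and y < V - x, so V - x occurs nowhere
    rcases List.pairwise_cons.mp hy with ⟨hymax, hys⟩
    have h0 : (y :: ys).count (V - x) = 0 := by
      apply List.count_eq_zero.mpr
      intro hmem
      rcases List.mem_cons.mp hmem with h | h
      · omega
      · have := hymax _ h; omega
    rw [List.map_cons, List.sum_cons, h0, ih (List.pairwise_cons.mp hx).2 hy]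
    simp
  | case4 x xs y ys hlt hgt ih =>
    -- x + y > V: y > V - x' for every x' in x :: xs, so dropping y changes no count
    have hxmin := (List.pairwise_cons.mp hx).1
    rcases List.pairwise_cons.mp hy with ⟨_, hys⟩
    rw [ih hx hys]
    apply congrArg List.sum
    apply List.map_congr_left
    intro x' hx'
    have hxx' : x ≤ x' := by
      rcases List.mem_cons.mp hx' with h | h
      · omega
      · exact hxmin x' h
    have hne : y ≠ V - x' := by omega
    rw [List.count_cons_of_ne hne]
  | case5 x xs y ys hlt hgt ih =>
    -- x + y = V: the a-run matches exactly the c-run (count = run length), and everything past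
    -- the a-run needs a strictly smaller c-sum, so both runs drop together
    have hyx : y = V - x := by omega
    have htA : ∀ z ∈ (x :: xs).takeWhile (fun w => w == x), z = x := by
      intro z hz
      simpa using List.mem_takeWhile_imp hz
    have hdA := lt_of_mem_dropWhile_head x xs hx
    have hubC : ∀ z ∈ y :: ys, z ≤ y := by
      intro z hz
      rcases List.mem_cons.mp hz with rfl | h
      · exact le_refl _
      · exact (List.pairwise_cons.mp hy).1 z h
    have htC : ∀ z ∈ (y :: ys).takeWhile (fun w => w == y), z = y := by
      intro z hz
      simpa using List.mem_takeWhile_imp hz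
    -- counts of y in y :: ys = c-run length
    have hcy : (y :: ys).count y = ((y :: ys).takeWhile (fun w => w == y)).length :=
      count_eq_takeWhile_len y (y :: ys) hy hubC
    -- sublists stay sorted
    have hxd : ((x :: xs).dropWhile (fun w => w == x)).Pairwise (· ≤ ·) :=
      hx.sublist (List.dropWhile_sublist _)
    have hyd : ((y :: ys).dropWhile (fun w => w == y)).Pairwise (fun a b => b ≤ a) :=
      hy.sublist (List.dropWhile_sublist _)
    rw [ih hxd hyd]
    -- split x :: xs into its head run and the rest
    conv_rhs => rw [← List.takeWhile_append_dropWhile (p := fun w => w == x) (l := x :: xs)]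
    rw [List.map_append, List.sum_append]
    congr 1
    · -- head run: every element is x, each contributes the c-run length
      have : ((x :: xs).takeWhile (fun w => w == x)).map
               (fun x' => (((y :: ys).count (V - x') : Nat) : Int))
           = ((x :: xs).takeWhile (fun w => w == x)).map
               (fun _ => ((((y :: ys).takeWhile (fun w => w == y)).length : Nat) : Int)) := by
        apply List.map_congr_left
        intro z hz
        rw [htA z hz, ← hyx, hcy]
      rw [this, sum_map_const_int]
    · -- the rest: each remaining a-sum z is > x, so V - z < y and the whole c-run is irrelevant
      apply congrArg List.sum
      apply List.map_congr_left
      intro z hz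
      have hzx : x < z := hdA z hz
      have hcount : (y :: ys).count (V - z)
          = ((y :: ys).dropWhile (fun w => w == y)).count (V - z) := by
        conv_lhs => rw [← List.takeWhile_append_dropWhile (p := fun w => w == y) (l := y :: ys)]
        rw [List.count_append]
        have h0 : ((y :: ys).takeWhile (fun w => w == y)).count (V - z) = 0 := by
          apply List.count_eq_zero.mpr
          intro hmem
          have := htC _ hmem
          omega
        omega
      rw [hcount]

-- ===== VERDICT (by name: the statement is the Claim_ definition above) =====
theorem count_coin_combinations_spec : Claim_equal_count_coin_combinations := by
  intro N V a b c d _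
  unfold Spec_count_coin_combinations count_coin_combinations count_coin_combinations_alt
  rw [buildA_eq_counter]
  set L := a.flatMap (fun x => b.map (fun y => x + y)) with hL
  set M := c.flatMap (fun x => d.map (fun y => x + y)) with hM
  have h1 := accA_eq_sum_init a b
      (fun s => (PySem.Dict.counter M).getD (V - s) 0) 0
  simp only [sub_sub] at h1 ⊢
  rw [h1, zero_add]
  rw [tpGo_correct V _ _
        (by simpa using PySem.List.sorted_pairwise L (fun s => s))
        (by simpa using PySem.List.sorted_pairwise_rev M (fun s => s))]
  have hLp : (PySem.List.sorted L (fun s => s) false).Perm L := PySem.List.sorted_perm ..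
  have hMp : (PySem.List.sorted M (fun s => s) true).Perm M := PySem.List.sorted_perm ..
  have hcnt : ∀ x : Int,
      (PySem.Dict.counter M).getD (V - x) 0 = (((PySem.List.sorted M (fun s => s) true).count (V - x) : Nat) : Int) := by
    intro x
    rw [PySem.Dict.getD_counter, hMp.count_eq]
  calc (L.map (fun s => (PySem.Dict.counter M).getD (V - s) 0)).sum
      = (L.map (fun x => (((PySem.List.sorted M (fun s => s) true).count (V - x) : Nat) : Int))).sum := by
        exact congrArg List.sum (List.map_congr_left (fun x _ => hcnt x))
    _ = ((PySem.List.sorted L (fun s => s) false).map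
          (fun x => (((PySem.List.sorted M (fun s => s) true).count (V - x) : Nat) : Int))).sum :=
        (List.Perm.sum_eq (hLp.map _)).symm
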